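-- pv_equiv track=rewrite | github.com/linyichang91-bit/rpg-game | server/pipelines/loot.py | _resolve_attribute_score
-- ===== SOURCE A (Python) =====
-- def _resolve_attribute_score(attributes: dict[str, int], requested_key: str) -> int | None:
--     candidate_groups = (
--         ("stat_insight", "attr_focus", "attr_perception"),
--         ("stat_tenacity", "attr_will"),
--         ("stat_agility", "attr_dex"),
--         ("stat_power", "attr_power"),
--         ("stat_presence", "attr_presence", "charisma"),
--     )
--
--     if requested_key in attributes:
--         return attributes[requested_key]
--
--     normalized = str(requested_key).strip().lower()
--     for candidates in candidate_groups:
--         normalized_candidates = {candidate.lower() for candidate in candidates}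
--         if normalized not in normalized_candidates:
--             continue
--         for candidate in candidates:
--             if candidate in attributes:
--                 return attributes[candidate]
--
--     return None
-- ===== SOURCE B (Python) =====
-- _CANDIDATE_GROUPS = (
--     ("stat_insight", "attr_focus", "attr_perception"),
--     ("stat_tenacity", "attr_will"),
--     ("stat_agility", "attr_dex"),
--     ("stat_power", "attr_power"),
--     ("stat_presence", "attr_presence", "charisma"),
-- )
--
-- # one flat table built once: lowered alias -> (group id, priority rank inside the group)
-- _ALIAS_INFO = {
--     cand.lower(): (gi, ri)
--     for gi, group in enumerate(_CANDIDATE_GROUPS)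
--     for ri, cand in enumerate(group)
-- }
--
--
-- def _best_score_in_group(attributes, gid):
--     # single pass over the attribute entries: keep the entry of that group
--     # with the smallest priority rank (instead of probing candidates one by one)
--     best = None
--     for key, value in attributes.items():
--         meta = _ALIAS_INFO.get(key)
--         if meta is not None and meta[0] == gid and (best is None or meta[1] < best[0]):
--             best = (meta[1], value)
--     return None if best is None else best[1]
--
--
-- def _alias_score(attributes, normalized):
--     info = _ALIAS_INFO.get(normalized)
--     if info is None:
--         return None
--     return _best_score_in_group(attributes, info[0])
--
--
-- def _resolve_attribute_score(attributes: dict[str, int], requested_key: str) -> int | None: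
--     if requested_key in attributes:
--         return attributes[requested_key]
--     return _alias_score(attributes, str(requested_key).strip().lower())
-- ===== Notes on version B (the rewrite author's own statement) =====
-- stated objective: alternative
-- what changed: B inverts the traversal: a flat lowered-alias -> (group id, rank) table is built once, the key is resolved to a group id by one lookup, and a single pass over the attribute entries keeps the match with the smallest rank, instead of A's scan over candidate groups that rebuilds a lowered alias set per group and probes the dict candidate by candidate.
import Mathlib
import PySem

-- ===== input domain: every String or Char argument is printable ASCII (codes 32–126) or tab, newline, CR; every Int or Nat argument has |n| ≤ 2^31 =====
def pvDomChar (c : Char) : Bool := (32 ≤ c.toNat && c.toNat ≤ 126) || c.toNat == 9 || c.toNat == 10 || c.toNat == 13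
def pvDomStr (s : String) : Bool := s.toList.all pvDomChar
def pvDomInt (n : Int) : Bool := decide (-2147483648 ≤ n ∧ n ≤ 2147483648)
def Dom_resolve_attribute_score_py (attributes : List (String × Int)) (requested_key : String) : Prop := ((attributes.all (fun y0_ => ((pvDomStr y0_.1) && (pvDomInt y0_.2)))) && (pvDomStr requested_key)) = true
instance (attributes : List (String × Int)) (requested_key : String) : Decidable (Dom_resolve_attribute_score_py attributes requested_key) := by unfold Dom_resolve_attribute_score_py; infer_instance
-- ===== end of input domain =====

-- B inverts the traversal: instead of A's scan over candidate groups probing the dict per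
-- candidate, B maps the key to a (group id, rank) via one flat table and makes a single
-- pass over the attribute entries keeping the lowest-rank match; same return value.

-- ===== PORT A =====
def pvGroupsA : List (List String) :=
  [["stat_insight", "attr_focus", "attr_perception"],
   ["stat_tenacity", "attr_will"],
   ["stat_agility", "attr_dex"],
   ["stat_power", "attr_power"],
   ["stat_presence", "attr_presence", "charisma"]]

-- A's inner loop: "for candidate in candidates: if candidate in attributes: return attributes[candidate]"
def pvInnerA (d : PySem.Dict String Int) : List String → Option Int
  | [] => none
  | c :: cs => match d.get? c with
    | some v => some v
    | none => pvInnerA d cs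

-- A's outer loop over candidate_groups, rebuilding the lowered set each iteration
def pvOuterA (d : PySem.Dict String Int) (normalized : String) : List (List String) → Option Int
  | [] => none
  | g :: gs =>
    if PySem.Set.contains (PySem.Set.ofList (g.map PySem.Str.lower)) normalized then
      match pvInnerA d g with
      | some v => some v
      | none => pvOuterA d normalized gs
    else pvOuterA d normalized gs

def resolve_attribute_score_py (attributes : List (String × Int)) (requested_key : String) : Option Int :=
  let d := PySem.Dict.mk attributes
  match d.get? requested_key with
  | some v => some v
  | none => pvOuterA d (PySem.Str.lower (PySem.Str.strip requested_key)) pvGroupsA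

-- ===== PORT B =====
def pvGroupsB : List (List String) :=
  [["stat_insight", "attr_focus", "attr_perception"],
   ["stat_tenacity", "attr_will"],
   ["stat_agility", "attr_dex"],
   ["stat_power", "attr_power"],
   ["stat_presence", "attr_presence", "charisma"]]

-- Source B's _ALIAS_INFO comprehension: lowered alias -> (group id, rank inside the group)
def pvAliasInfo : PySem.Dict String (Int × Int) :=
  (PySem.List.enumerate pvGroupsB).foldl
    (fun d gg => (PySem.List.enumerate gg.2).foldl
      (fun d rc => d.insert (PySem.Str.lower rc.2) (gg.1, rc.1)) d)
    PySem.Dict.empty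

-- Source B's loop body: keep the (rank, value) with the smallest rank in the requested group
def pvScanStep (gid : Int) (best : Option (Int × Int)) (kv : String × Int) : Option (Int × Int) :=
  match pvAliasInfo.get? kv.1 with
  | some m =>
    if m.1 == gid && (match best with | none => true | some b => decide (m.2 < b.1))
    then some (m.2, kv.2) else best
  | none => best

-- Source B's _best_score_in_group: one pass, smallest rank wins
def pvBestScoreInGroup (attributes : List (String × Int)) (gid : Int) : Option Int :=
  match attributes.foldl (pvScanStep gid) none with
  | none => none
  | some b => some b.2

-- Source B's _alias_score: table lookup, then the single pass over the matched group
def pvAliasLookup (attributes : List (String × Int)) (normalized : String) : Option Int :=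
  match pvAliasInfo.get? normalized with
  | none => none
  | some info => pvBestScoreInGroup attributes info.1

def resolve_attribute_score_py_alt (attributes : List (String × Int)) (requested_key : String) : Option Int :=
  let d := PySem.Dict.mk attributes
  match d.get? requested_key with
  | some v => some v
  | none => pvAliasLookup attributes (PySem.Str.lower (PySem.Str.strip requested_key))

-- ===== PRECONDITION & SPEC =====
def Spec_resolve_attribute_score_py (attributes : List (String × Int)) (requested_key : String) (out : Option Int) : Prop := out = resolve_attribute_score_py_alt attributes requested_key
instance (attributes : List (String × Int)) (requested_key : String) (out : Option Int) : Decidable (Spec_resolve_attribute_score_py attributes requested_key out) := by unfold Spec_resolve_attribute_score_py; infer_instance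

-- ===== CLAIM =====
def Claim_equal_resolve_attribute_score_py : Prop := ∀ (attributes : List (String × Int)) (requested_key : String), Dom_resolve_attribute_score_py attributes requested_key → Spec_resolve_attribute_score_py attributes requested_key (resolve_attribute_score_py attributes requested_key)

-- ===== LEMMAS AND PROOFS =====

-- first-match lookup over a raw pair list; (Dict.mk L).get? c is definitionally this
def pvLk (L : List (String × Int)) (c : String) : Option Int :=
  (L.find? (fun p => p.1 == c)).map (·.2)

def pvRank (g : Int) (k : String) : Option Int :=
  match pvAliasInfo.get? k with
  | some m => if m.1 = g then some m.2 else none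
  | none => none

def pvStep' (g : Int) (best : Option (Int × Int)) (kv : String × Int) : Option (Int × Int) :=
  match pvRank g kv.1 with
  | some r =>
    if (match best with | none => true | some b => decide (r < b.1))
    then some (r, kv.2) else best
  | none => best

def pvMerge : Option (Int × Int) → Option (Int × Int) → Option (Int × Int)
  | b, none => b
  | none, some s => some s
  | some b, some s => if s.1 < b.1 then some s else some b

def pvSpec3 (c0 c1 c2 : String) (L : List (String × Int)) : Option (Int × Int) :=
  match pvLk L c0 with
  | some v => some ((0 : Int), v)
  | none => match pvLk L c1 with
    | some v => some ((1 : Int), v)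
    | none => match pvLk L c2 with
      | some v => some ((2 : Int), v)
      | none => none

theorem pvMerge_none_left (s : Option (Int × Int)) : pvMerge none s = s := by
  cases s <;> rfl

theorem pvMerge_none_right (b : Option (Int × Int)) : pvMerge b none = b := rfl

theorem pvMerge_some_some (b s : Int × Int) :
    pvMerge (some b) (some s) = if s.1 < b.1 then some s else some b := rfl

theorem pvMerge_assoc (a b c : Option (Int × Int)) :
    pvMerge (pvMerge a b) c = pvMerge a (pvMerge b c) := by
  rcases a with _ | a
  · rw [pvMerge_none_left, pvMerge_none_left]
  rcases b with _ | b
  · rw [pvMerge_none_right, pvMerge_none_left]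
  rcases c with _ | c
  · rw [pvMerge_none_right, pvMerge_none_right]
  by_cases h1 : b.1 < a.1 <;> by_cases h2 : c.1 < b.1 <;> by_cases h3 : c.1 < a.1 <;>
    simp [pvMerge, h1, h2, h3] <;> omega

theorem pvStep_eq (g : Int) : pvScanStep g = pvStep' g := by
  funext best kv
  unfold pvScanStep pvStep' pvRank
  cases h : pvAliasInfo.get? kv.1 with
  | none => rfl
  | some m =>
    by_cases hg : m.1 = g
    · simp [hg]
    · simp [hg]

theorem pvStep'_merge (g : Int) (b : Option (Int × Int)) (kv : String × Int) :
    pvStep' g b kv = pvMerge b (pvStep' g none kv) := by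
  cases h : pvRank g kv.1 with
  | none => cases b <;> simp [pvStep', h, pvMerge]
  | some r =>
    rcases b with _ | b
    · simp [pvStep', h, pvMerge_none_left]
    · by_cases hr : r < b.1 <;> simp [pvStep', h, hr, pvMerge]

theorem pvFoldl_merge (g : Int) (L : List (String × Int)) (b : Option (Int × Int)) :
    L.foldl (pvStep' g) b = pvMerge b (L.foldl (pvStep' g) none) := by
  induction L generalizing b with
  | nil => cases b <;> rfl
  | cons kv L ih =>
    rw [List.foldl_cons, List.foldl_cons, ih, ih (pvStep' g none kv),
        pvStep'_merge, pvMerge_assoc]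

theorem pvLk_cons_eq {k c : String} (v : Int) (L : List (String × Int)) (h : k = c) :
    pvLk ((k, v) :: L) c = some v := by
  unfold pvLk
  rw [List.find?_cons_of_pos]
  · rfl
  · simpa using h

theorem pvLk_cons_ne {k c : String} (v : Int) (L : List (String × Int)) (h : ¬ k = c) :
    pvLk ((k, v) :: L) c = pvLk L c := by
  unfold pvLk
  rw [List.find?_cons_of_neg]
  simpa using h

theorem pvSpec3_nonneg (c0 c1 c2 : String) (L : List (String × Int)) (b : Int × Int)
    (hb : pvSpec3 c0 c1 c2 L = some b) : 0 ≤ b.1 := by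
  revert hb; unfold pvSpec3
  rcases pvLk L c0 with _ | w <;> rcases pvLk L c1 with _ | w1 <;>
    rcases pvLk L c2 with _ | w2 <;> simp <;> rintro rfl <;> norm_num

theorem pvSpec3_pos (c0 c1 c2 : String) (L : List (String × Int)) (b : Int × Int)
    (h0 : pvLk L c0 = none) (hb : pvSpec3 c0 c1 c2 L = some b) : 1 ≤ b.1 := by
  revert hb; unfold pvSpec3
  rw [h0]
  rcases pvLk L c1 with _ | w1 <;> rcases pvLk L c2 with _ | w2 <;>
    simp <;> rintro rfl <;> norm_num

theorem pvScan3 (g : Int) (c0 c1 c2 : String)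
    (h : ∀ k, pvRank g k = if c0 = k then some 0 else if c1 = k then some 1
      else if c2 = k then some 2 else none)
    (L : List (String × Int)) :
    L.foldl (pvStep' g) none = pvSpec3 c0 c1 c2 L := by
  induction L with
  | nil => rfl
  | cons kv L ih =>
    obtain ⟨k, v⟩ := kv
    rw [List.foldl_cons, pvFoldl_merge, ih]
    by_cases h0 : c0 = k
    · subst h0
      have hs : pvStep' g none (c0, v) = some (0, v) := by simp [pvStep', h]
      have e0 : pvLk ((c0, v) :: L) c0 = some v := pvLk_cons_eq v L rfl
      rw [hs]
      rcases hspec : pvSpec3 c0 c1 c2 L with _ | b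
      · simp [pvSpec3, e0, pvMerge]
      · have hb := pvSpec3_nonneg c0 c1 c2 L b hspec
        rw [pvMerge_some_some, if_neg (by omega)]
        simp [pvSpec3, e0]
    · by_cases h1 : c1 = k
      · subst h1
        have hs : pvStep' g none (c1, v) = some (1, v) := by simp [pvStep', h, h0]
        have e0 : pvLk ((c1, v) :: L) c0 = pvLk L c0 :=
          pvLk_cons_ne v L (fun e => h0 e.symm)
        have e1 : pvLk ((c1, v) :: L) c1 = some v := pvLk_cons_eq v L rfl
        rw [hs]
        rcases hl0 : pvLk L c0 with _ | w
        · rcases hspec : pvSpec3 c0 c1 c2 L with _ | b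
          · simp [pvSpec3, e0, e1, hl0, pvMerge]
          · have hb := pvSpec3_pos c0 c1 c2 L b hl0 hspec
            rw [pvMerge_some_some, if_neg (by omega)]
            simp [pvSpec3, e0, e1, hl0]
        · rw [show pvSpec3 c0 c1 c2 L = some (0, w) from by simp [pvSpec3, hl0],
              pvMerge_some_some, if_pos (by norm_num)]
          simp [pvSpec3, e0, hl0]
      · by_cases h2 : c2 = k
        · subst h2
          have hs : pvStep' g none (c2, v) = some (2, v) := by simp [pvStep', h, h0, h1]
          have e0 : pvLk ((c2, v) :: L) c0 = pvLk L c0 :=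
            pvLk_cons_ne v L (fun e => h0 e.symm)
          have e1 : pvLk ((c2, v) :: L) c1 = pvLk L c1 :=
            pvLk_cons_ne v L (fun e => h1 e.symm)
          have e2 : pvLk ((c2, v) :: L) c2 = some v := pvLk_cons_eq v L rfl
          rw [hs]
          rcases hl0 : pvLk L c0 with _ | w
          · rcases hl1 : pvLk L c1 with _ | w1
            · rcases hl2 : pvLk L c2 with _ | w2 <;>
                simp [pvSpec3, e0, e1, e2, hl0, hl1, hl2, pvMerge]
            · rw [show pvSpec3 c0 c1 c2 L = some (1, w1) from by simp [pvSpec3, hl0, hl1],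
                  pvMerge_some_some, if_pos (by norm_num)]
              simp [pvSpec3, e0, e1, hl0, hl1]
          · rw [show pvSpec3 c0 c1 c2 L = some (0, w) from by simp [pvSpec3, hl0],
                pvMerge_some_some, if_pos (by norm_num)]
            simp [pvSpec3, e0, hl0]
        · have hs : pvStep' g none (k, v) = none := by simp [pvStep', h, h0, h1, h2]
          have e0 : pvLk ((k, v) :: L) c0 = pvLk L c0 :=
            pvLk_cons_ne v L (fun e => h0 e.symm)
          have e1 : pvLk ((k, v) :: L) c1 = pvLk L c1 :=
            pvLk_cons_ne v L (fun e => h1 e.symm)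
          have e2 : pvLk ((k, v) :: L) c2 = pvLk L c2 :=
            pvLk_cons_ne v L (fun e => h2 e.symm)
          rw [hs, pvMerge_none_left]
          unfold pvSpec3
          rw [e0, e1, e2]


theorem pvAliasInfo_lit : pvAliasInfo = PySem.Dict.mk
    [("stat_insight", ((0 : Int), (0 : Int))), ("attr_focus", (0, 1)), ("attr_perception", (0, 2)),
     ("stat_tenacity", (1, 0)), ("attr_will", (1, 1)),
     ("stat_agility", (2, 0)), ("attr_dex", (2, 1)),
     ("stat_power", (3, 0)), ("attr_power", (3, 1)),
     ("stat_presence", (4, 0)), ("attr_presence", (4, 1)), ("charisma", (4, 2))] := rfl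

theorem pvAliasChain (k : String) : pvAliasInfo.get? k =
    if "stat_insight" = k then some ((0 : Int), (0 : Int))
    else if "attr_focus" = k then some (0, 1)
    else if "attr_perception" = k then some (0, 2)
    else if "stat_tenacity" = k then some (1, 0)
    else if "attr_will" = k then some (1, 1)
    else if "stat_agility" = k then some (2, 0)
    else if "attr_dex" = k then some (2, 1)
    else if "stat_power" = k then some (3, 0)
    else if "attr_power" = k then some (3, 1)
    else if "stat_presence" = k then some (4, 0)
    else if "attr_presence" = k then some (4, 1)
    else if "charisma" = k then some (4, 2)
    else none := by
  rw [pvAliasInfo_lit]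
  simp only [PySem.Dict.get?_mk_cons, beq_iff_eq]
  rfl

set_option maxHeartbeats 1000000 in
theorem pvRank0 (k : String) : pvRank 0 k =
    if "stat_insight" = k then some 0 else if "attr_focus" = k then some 1
    else if "attr_perception" = k then some 2 else none := by
  rw [pvRank, pvAliasChain k]
  split_ifs <;> norm_num

set_option maxHeartbeats 1000000 in
theorem pvRank1 (k : String) : pvRank 1 k =
    if "stat_tenacity" = k then some 0 else if "attr_will" = k then some 1
    else if "attr_will" = k then some 2 else none := by
  rw [pvRank, pvAliasChain k]
  split_ifs <;> first | rfl | (subst_vars; simp_all) | norm_num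

set_option maxHeartbeats 1000000 in
theorem pvRank2 (k : String) : pvRank 2 k =
    if "stat_agility" = k then some 0 else if "attr_dex" = k then some 1
    else if "attr_dex" = k then some 2 else none := by
  rw [pvRank, pvAliasChain k]
  split_ifs <;> first | rfl | (subst_vars; simp_all) | norm_num

set_option maxHeartbeats 1000000 in
theorem pvRank3 (k : String) : pvRank 3 k =
    if "stat_power" = k then some 0 else if "attr_power" = k then some 1
    else if "attr_power" = k then some 2 else none := by
  rw [pvRank, pvAliasChain k]
  split_ifs <;> first | rfl | (subst_vars; simp_all) | norm_num

set_option maxHeartbeats 1000000 in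
theorem pvRank4 (k : String) : pvRank 4 k =
    if "stat_presence" = k then some 0 else if "attr_presence" = k then some 1
    else if "charisma" = k then some 2 else none := by
  rw [pvRank, pvAliasChain k]
  split_ifs <;> first | rfl | (subst_vars; simp_all) | norm_num

theorem pvLowerLits :
    PySem.Str.lower "stat_insight" = "stat_insight" ∧
    PySem.Str.lower "attr_focus" = "attr_focus" ∧
    PySem.Str.lower "attr_perception" = "attr_perception" ∧
    PySem.Str.lower "stat_tenacity" = "stat_tenacity" ∧
    PySem.Str.lower "attr_will" = "attr_will" ∧
    PySem.Str.lower "stat_agility" = "stat_agility" ∧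
    PySem.Str.lower "attr_dex" = "attr_dex" ∧
    PySem.Str.lower "stat_power" = "stat_power" ∧
    PySem.Str.lower "attr_power" = "attr_power" ∧
    PySem.Str.lower "stat_presence" = "stat_presence" ∧
    PySem.Str.lower "attr_presence" = "attr_presence" ∧
    PySem.Str.lower "charisma" = "charisma" := by decide

theorem pvGet?_eq_lk (L : List (String × Int)) (c : String) :
    (PySem.Dict.mk L).get? c = pvLk L c := rfl

theorem pvInner_eq_spec3 (attributes : List (String × Int)) (c0 c1 c2 : String) :
    pvInnerA (PySem.Dict.mk attributes) [c0, c1, c2] =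
      (match pvSpec3 c0 c1 c2 attributes with
       | none => none
       | some b => some b.2) := by
  unfold pvSpec3
  rcases h0 : pvLk attributes c0 <;> rcases h1 : pvLk attributes c1 <;>
    rcases h2 : pvLk attributes c2 <;>
      simp [pvInnerA, pvGet?_eq_lk, h0, h1, h2]

theorem pvInner2_eq_spec3 (attributes : List (String × Int)) (c0 c1 : String) :
    pvInnerA (PySem.Dict.mk attributes) [c0, c1] =
      (match pvSpec3 c0 c1 c1 attributes with
       | none => none
       | some b => some b.2) := by
  unfold pvSpec3
  rcases h0 : pvLk attributes c0 <;> rcases h1 : pvLk attributes c1 <;>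
      simp [pvInnerA, pvGet?_eq_lk, h0, h1]


theorem pvBridge (attributes : List (String × Int)) (n : String) :
    pvOuterA (PySem.Dict.mk attributes) n pvGroupsA = pvAliasLookup attributes n := by
  have hB0 : attributes.foldl (pvScanStep 0) none
      = pvSpec3 "stat_insight" "attr_focus" "attr_perception" attributes := by
    rw [pvStep_eq]; exact pvScan3 0 _ _ _ pvRank0 attributes
  have hB1 : attributes.foldl (pvScanStep 1) none
      = pvSpec3 "stat_tenacity" "attr_will" "attr_will" attributes := by
    rw [pvStep_eq]; exact pvScan3 1 _ _ _ pvRank1 attributes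
  have hB2 : attributes.foldl (pvScanStep 2) none
      = pvSpec3 "stat_agility" "attr_dex" "attr_dex" attributes := by
    rw [pvStep_eq]; exact pvScan3 2 _ _ _ pvRank2 attributes
  have hB3 : attributes.foldl (pvScanStep 3) none
      = pvSpec3 "stat_power" "attr_power" "attr_power" attributes := by
    rw [pvStep_eq]; exact pvScan3 3 _ _ _ pvRank3 attributes
  have hB4 : attributes.foldl (pvScanStep 4) none
      = pvSpec3 "stat_presence" "attr_presence" "charisma" attributes := by
    rw [pvStep_eq]; exact pvScan3 4 _ _ _ pvRank4 attributes
  unfold pvAliasLookup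
  rw [pvAliasChain]
  by_cases h0 : "stat_insight" = n
  · subst h0
    rw [if_pos rfl]
    simp only [pvBestScoreInGroup, hB0]
    refine Eq.trans ?_ (pvInner_eq_spec3 attributes "stat_insight" "attr_focus" "attr_perception")
    simp [pvOuterA, pvGroupsA, pvLowerLits]
    cases hI : pvInnerA (PySem.Dict.mk attributes)
        ["stat_insight", "attr_focus", "attr_perception"] <;> simp [hI]
  rw [if_neg h0]
  by_cases h1 : "attr_focus" = n
  · subst h1
    rw [if_pos rfl]
    simp only [pvBestScoreInGroup, hB0]
    refine Eq.trans ?_ (pvInner_eq_spec3 attributes "stat_insight" "attr_focus" "attr_perception")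
    simp [pvOuterA, pvGroupsA, pvLowerLits]
    cases hI : pvInnerA (PySem.Dict.mk attributes)
        ["stat_insight", "attr_focus", "attr_perception"] <;> simp [hI]
  rw [if_neg h1]
  by_cases h2 : "attr_perception" = n
  · subst h2
    rw [if_pos rfl]
    simp only [pvBestScoreInGroup, hB0]
    refine Eq.trans ?_ (pvInner_eq_spec3 attributes "stat_insight" "attr_focus" "attr_perception")
    simp [pvOuterA, pvGroupsA, pvLowerLits]
    cases hI : pvInnerA (PySem.Dict.mk attributes)
        ["stat_insight", "attr_focus", "attr_perception"] <;> simp [hI]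
  rw [if_neg h2]
  by_cases h3 : "stat_tenacity" = n
  · subst h3
    rw [if_pos rfl]
    simp only [pvBestScoreInGroup, hB1]
    refine Eq.trans ?_ (pvInner2_eq_spec3 attributes "stat_tenacity" "attr_will")
    simp [pvOuterA, pvGroupsA, pvLowerLits]
    cases hI : pvInnerA (PySem.Dict.mk attributes)
        ["stat_tenacity", "attr_will"] <;> simp [hI]
  rw [if_neg h3]
  by_cases h4 : "attr_will" = n
  · subst h4
    rw [if_pos rfl]
    simp only [pvBestScoreInGroup, hB1]
    refine Eq.trans ?_ (pvInner2_eq_spec3 attributes "stat_tenacity" "attr_will")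
    simp [pvOuterA, pvGroupsA, pvLowerLits]
    cases hI : pvInnerA (PySem.Dict.mk attributes)
        ["stat_tenacity", "attr_will"] <;> simp [hI]
  rw [if_neg h4]
  by_cases h5 : "stat_agility" = n
  · subst h5
    rw [if_pos rfl]
    simp only [pvBestScoreInGroup, hB2]
    refine Eq.trans ?_ (pvInner2_eq_spec3 attributes "stat_agility" "attr_dex")
    simp [pvOuterA, pvGroupsA, pvLowerLits]
    cases hI : pvInnerA (PySem.Dict.mk attributes)
        ["stat_agility", "attr_dex"] <;> simp [hI]
  rw [if_neg h5]
  by_cases h6 : "attr_dex" = n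
  · subst h6
    rw [if_pos rfl]
    simp only [pvBestScoreInGroup, hB2]
    refine Eq.trans ?_ (pvInner2_eq_spec3 attributes "stat_agility" "attr_dex")
    simp [pvOuterA, pvGroupsA, pvLowerLits]
    cases hI : pvInnerA (PySem.Dict.mk attributes)
        ["stat_agility", "attr_dex"] <;> simp [hI]
  rw [if_neg h6]
  by_cases h7 : "stat_power" = n
  · subst h7
    rw [if_pos rfl]
    simp only [pvBestScoreInGroup, hB3]
    refine Eq.trans ?_ (pvInner2_eq_spec3 attributes "stat_power" "attr_power")
    simp [pvOuterA, pvGroupsA, pvLowerLits]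
    cases hI : pvInnerA (PySem.Dict.mk attributes)
        ["stat_power", "attr_power"] <;> simp [hI]
  rw [if_neg h7]
  by_cases h8 : "attr_power" = n
  · subst h8
    rw [if_pos rfl]
    simp only [pvBestScoreInGroup, hB3]
    refine Eq.trans ?_ (pvInner2_eq_spec3 attributes "stat_power" "attr_power")
    simp [pvOuterA, pvGroupsA, pvLowerLits]
    cases hI : pvInnerA (PySem.Dict.mk attributes)
        ["stat_power", "attr_power"] <;> simp [hI]
  rw [if_neg h8]
  by_cases h9 : "stat_presence" = n
  · subst h9
    rw [if_pos rfl]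
    simp only [pvBestScoreInGroup, hB4]
    refine Eq.trans ?_ (pvInner_eq_spec3 attributes "stat_presence" "attr_presence" "charisma")
    simp [pvOuterA, pvGroupsA, pvLowerLits]
    cases hI : pvInnerA (PySem.Dict.mk attributes)
        ["stat_presence", "attr_presence", "charisma"] <;> simp [hI]
  rw [if_neg h9]
  by_cases h10 : "attr_presence" = n
  · subst h10
    rw [if_pos rfl]
    simp only [pvBestScoreInGroup, hB4]
    refine Eq.trans ?_ (pvInner_eq_spec3 attributes "stat_presence" "attr_presence" "charisma")
    simp [pvOuterA, pvGroupsA, pvLowerLits]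
    cases hI : pvInnerA (PySem.Dict.mk attributes)
        ["stat_presence", "attr_presence", "charisma"] <;> simp [hI]
  rw [if_neg h10]
  by_cases h11 : "charisma" = n
  · subst h11
    rw [if_pos rfl]
    simp only [pvBestScoreInGroup, hB4]
    refine Eq.trans ?_ (pvInner_eq_spec3 attributes "stat_presence" "attr_presence" "charisma")
    simp [pvOuterA, pvGroupsA, pvLowerLits]
    cases hI : pvInnerA (PySem.Dict.mk attributes)
        ["stat_presence", "attr_presence", "charisma"] <;> simp [hI]
  rw [if_neg h11]
  have h0' : ¬ n = "stat_insight" := fun e => h0 e.symm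
  have h1' : ¬ n = "attr_focus" := fun e => h1 e.symm
  have h2' : ¬ n = "attr_perception" := fun e => h2 e.symm
  have h3' : ¬ n = "stat_tenacity" := fun e => h3 e.symm
  have h4' : ¬ n = "attr_will" := fun e => h4 e.symm
  have h5' : ¬ n = "stat_agility" := fun e => h5 e.symm
  have h6' : ¬ n = "attr_dex" := fun e => h6 e.symm
  have h7' : ¬ n = "stat_power" := fun e => h7 e.symm
  have h8' : ¬ n = "attr_power" := fun e => h8 e.symm
  have h9' : ¬ n = "stat_presence" := fun e => h9 e.symm
  have h10' : ¬ n = "attr_presence" := fun e => h10 e.symm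
  have h11' : ¬ n = "charisma" := fun e => h11 e.symm
  simp [pvOuterA, pvGroupsA, pvLowerLits, h0', h1', h2', h3', h4', h5', h6', h7',
        h8', h9', h10', h11']


-- ===== VERDICT =====
set_option maxHeartbeats 1000000 in
theorem resolve_attribute_score_py_spec : Claim_equal_resolve_attribute_score_py := by
  intro attributes requested_key _
  show resolve_attribute_score_py attributes requested_key
      = resolve_attribute_score_py_alt attributes requested_key
  simp only [resolve_attribute_score_py, resolve_attribute_score_py_alt]
  generalize (PySem.Dict.mk attributes).get? requested_key = o
  cases o with
  | some v => rfl
  | none => exact pvBridge attributes (PySem.Str.lower (PySem.Str.strip requested_key))
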